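-- pv_equiv track=rewrite | github.com/sempervent/gi | gi/combine.py | merge_with_existing
-- ===== SOURCE A (Python) =====
-- def parse_lines(text: str) -> list[str]:
--     """Parse text into lines with universal newlines."""
--     return text.replace("\r\n", "\n").replace("\r", "\n").split("\n")
--
-- def is_blank_line(line: str) -> bool:
--     """Check if a line is blank (empty or only whitespace)."""
--     return not line.strip()
--
-- def collapse_blank_lines(lines: list[str]) -> list[str]:
--     """Collapse runs of more than 2 blank lines to maximum 1."""
--     result = []
--     blank_count = 0
--
--     for line in lines:
--         if is_blank_line(line):
--             blank_count += 1
--             if blank_count <= 1: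
--                 result.append(line)
--         else:
--             blank_count = 0
--             result.append(line)
--
--     return result
--
-- def merge_with_existing(
--     existing_text: str, new_text: str, strategy: str = "append",
-- ) -> str:
--     """Merge new content with existing .gitignore content."""
--     if strategy == "replace":
--         return new_text
--
--     if not existing_text.strip():
--         return new_text
--
--     # Parse existing content
--     existing_lines = parse_lines(existing_text)
--     new_lines = parse_lines(new_text)
--
--     # Find existing gi-generated sections to avoid duplicates
--     existing_sections = set()
--     i = 0
--     while i < len(existing_lines):
--         line = existing_lines[i]
--         if line.startswith("###> "):
--             section_name = line[5:]
--             existing_sections.add(section_name)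
--             # Skip to end of section
--             while i < len(existing_lines) and not existing_lines[i].startswith("###< "):
--                 i += 1
--         i += 1
--
--     # Filter out sections that already exist
--     filtered_new_lines = []
--     i = 0
--     while i < len(new_lines):
--         line = new_lines[i]
--         if line.startswith("###> "):
--             section_name = line[5:]
--             if section_name in existing_sections:
--                 # Skip this entire section
--                 while i < len(new_lines) and not new_lines[i].startswith("###< "):
--                     i += 1
--                 if i < len(new_lines):
--                     i += 1  # Skip the ###< line
--                 continue
--         filtered_new_lines.append(line)
--         i += 1
--
--     # Combine existing and new content
--     combined_lines = existing_lines + filtered_new_lines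
--
--     # Collapse excessive blank lines
--     combined_lines = collapse_blank_lines(combined_lines)
--
--     # Ensure single trailing newline
--     result = "\n".join(combined_lines)
--     if result and not result.endswith("\n"):
--         result += "\n"
--
--     return result
-- ===== SOURCE B (Python) =====
-- def merge_with_existing(
--     existing_text: str, new_text: str, strategy: str = "append",
-- ) -> str:
--     """Merge new content with existing .gitignore content.
--
--     Segment algorithm: split the line lists at '###< ' close markers into
--     close-delimited segments; each segment contributes at most one section name
--     (its first '###> ' opener), and duplicate filtering becomes a per-segment
--     truncation at the first duplicated opener (which also drops the segment's
--     terminating close line)."""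
--     if strategy == "replace" or not existing_text.strip():
--         return new_text
--
--     def lines_of(text):
--         return text.replace("\r\n", "\n").replace("\r", "\n").split("\n")
--
--     def segments(lines):
--         """(body, close) pairs: body is close-free, close is [the '###< ' line]
--         terminating the segment ([] for the last segment)."""
--         segs, cur = [], []
--         for line in lines:
--             if line.startswith("###< "):
--                 segs.append((cur, [line]))
--                 cur = []
--             else:
--                 cur.append(line)
--         segs.append((cur, []))
--         return segs
--
--     existing_lines = lines_of(existing_text)
--     new_lines = lines_of(new_text)
--
--     # Existing section names: the first opener of each close-delimited segment.
--     existing_sections = set()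
--     for body, _ in segments(existing_lines):
--         for line in body:
--             if line.startswith("###> "):
--                 existing_sections.add(line[5:])
--                 break
--
--     # Per segment: keep lines up to the first duplicated opener; a segment with
--     # a duplicated opener also loses its terminating close line.
--     kept = []
--     for body, close in segments(new_lines):
--         dup = False
--         for line in body:
--             if line.startswith("###> ") and line[5:] in existing_sections:
--                 dup = True
--                 break
--             kept.append(line)
--         if not dup:
--             kept += close
--
--     lines = existing_lines + kept
--     merged = [line for prev, line in zip(["."] + lines, lines)
--               if line.strip() or prev.strip()]
--
--     text = "\n".join(merged)
--     if text and not text.endswith("\n"):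
--         text += "\n"
--     return text
-- ===== Notes on version B (the rewrite author's own statement) =====
-- stated objective: alternative
-- what changed: A's two index-jumping while loops with nested skip-to-close scans are replaced by a segment decomposition: the line lists are split at '###< ' lines into close-delimited segments, the existing-section set becomes 'first opener of each segment', and duplicate filtering becomes a per-segment truncation at the first duplicated opener (dropping that segment's close); blank collapsing is a zip-with-predecessor filter instead of a counter loop.
import Mathlib
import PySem

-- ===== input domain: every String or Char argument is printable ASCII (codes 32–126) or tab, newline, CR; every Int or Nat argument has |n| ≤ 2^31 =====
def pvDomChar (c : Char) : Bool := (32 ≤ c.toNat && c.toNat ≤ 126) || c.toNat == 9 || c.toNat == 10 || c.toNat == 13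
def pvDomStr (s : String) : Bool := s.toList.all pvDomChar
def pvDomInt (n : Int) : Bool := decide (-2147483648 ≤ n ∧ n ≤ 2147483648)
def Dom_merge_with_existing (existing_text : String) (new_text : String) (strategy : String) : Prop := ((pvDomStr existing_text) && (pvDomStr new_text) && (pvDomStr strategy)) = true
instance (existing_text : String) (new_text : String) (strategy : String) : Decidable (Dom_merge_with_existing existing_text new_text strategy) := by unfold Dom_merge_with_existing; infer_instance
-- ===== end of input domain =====

-- B replaces A's index-jumping while loops (with nested skip-to-close scans) by a
-- segment decomposition: split the line lists at '###< ' lines, take the first opener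
-- of each segment as its section name, and filter by truncating each segment at its
-- first duplicated opener. Same O(n) cost; return values identical (alternative).

-- ===== PORT A =====

-- parse_lines (shared module helper)
def parse_lines (text : String) : List String :=
  (PySem.Str.split? (PySem.Str.replace (PySem.Str.replace text "\r\n" "\n") "\r" "\n") "\n").getD []
  -- split? is `some` here since the separator "\n" is nonempty; getD only unwraps it

-- is_blank_line: `not line.strip()`
def is_blank_line (line : String) : Bool := PySem.Str.strip line == ""

-- collapse_blank_lines: the for-loop over (result, blank_count)
def collapse_go : List String → List String → Int → List String
  | [], result, _ => result
  | l :: ls, result, bc =>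
    if is_blank_line l then
      if bc + 1 ≤ 1 then collapse_go ls (result ++ [l]) (bc + 1)
      else collapse_go ls result (bc + 1)
    else collapse_go ls (result ++ [l]) 0

def collapse_blank_lines (lines : List String) : List String := collapse_go lines [] 0

-- inner `while i < len(lines) and not lines[i].startswith("###< "): i += 1`
def skip_to_close (lines : List String) (i : Nat) : Nat :=
  if h : i < lines.length then
    if PySem.Str.startswith lines[i] "###< " then i
    else skip_to_close lines (i + 1)
  else i
termination_by lines.length - i

theorem le_skip_to_close (lines : List String) (i : Nat) : i ≤ skip_to_close lines i := by
  unfold skip_to_close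
  split
  · split
    · exact le_refl i
    · exact le_trans (Nat.le_succ i) (le_skip_to_close lines (i + 1))
  · exact le_refl i
termination_by lines.length - i
decreasing_by omega

-- the first while loop of A: collect existing section names
def scan_sections (lines : List String) (i : Nat) (acc : PySem.Set String) : PySem.Set String :=
  if h : i < lines.length then
    let line := lines[i]
    if PySem.Str.startswith line "###> " then
      scan_sections lines (skip_to_close lines i + 1)
        (PySem.Set.add acc (PySem.Str.slice line (some 5) none))
    else scan_sections lines (i + 1) acc
  else acc
termination_by lines.length - i
decreasing_by
  · have := le_skip_to_close lines i; omega
  · omega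

-- the second while loop of A: drop sections already present
def filter_new (lines : List String) (sections : PySem.Set String) (i : Nat)
    (acc : List String) : List String :=
  if h : i < lines.length then
    let line := lines[i]
    if PySem.Str.startswith line "###> " &&
        decide ((PySem.Str.slice line (some 5) none) ∈ sections) then
      let j := skip_to_close lines i
      filter_new lines sections (if j < lines.length then j + 1 else j) acc
    else filter_new lines sections (i + 1) (acc ++ [line])
  else acc
termination_by lines.length - i
decreasing_by
  · have := le_skip_to_close lines i; split <;> omega
  · omega

def merge_with_existing (existing_text : String) (new_text : String) (strategy : String) : String :=
  if strategy == "replace" then new_text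
  else if PySem.Str.strip existing_text == "" then new_text
  else
    let existing_lines := parse_lines existing_text
    let new_lines := parse_lines new_text
    let existing_sections := scan_sections existing_lines 0 (PySem.Set.ofList [])
    let filtered_new_lines := filter_new new_lines existing_sections 0 []
    let combined_lines := collapse_blank_lines (existing_lines ++ filtered_new_lines)
    let result := PySem.Str.join "\n" combined_lines
    if result != "" && !(PySem.Str.endswith result "\n") then result ++ "\n" else result

-- ===== PORT B =====

-- segments: split the lines at '###< ' close lines into (body, close) pairs
def seg_step (st : List (List String × List String) × List String) (line : String) :
    List (List String × List String) × List String :=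
  if PySem.Str.startswith line "###< " then (st.1 ++ [(st.2, [line])], [])
  else (st.1, st.2 ++ [line])

def segments (lines : List String) : List (List String × List String) :=
  let st := lines.foldl seg_step ([], [])
  st.1 ++ [(st.2, [])]

-- the inner `for line in body: if line.startswith("###> "): … break`
def first_opener : List String → Option String
  | [] => none
  | l :: ls =>
    if PySem.Str.startswith l "###> " then some (PySem.Str.slice l (some 5) none)
    else first_opener ls

def sec_step (s : PySem.Set String) (seg : List String × List String) : PySem.Set String :=
  match first_opener seg.1 with
  | some n => PySem.Set.add s n
  | none => s

-- keep body lines up to the first duplicated opener; report whether one was found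
def trunc_body (sections : PySem.Set String) : List String → List String × Bool
  | [] => ([], false)
  | l :: ls =>
    if PySem.Str.startswith l "###> " &&
        decide ((PySem.Str.slice l (some 5) none) ∈ sections) then ([], true)
    else
      let r := trunc_body sections ls
      (l :: r.1, r.2)

def filt_step (sections : PySem.Set String) (acc : List String)
    (seg : List String × List String) : List String :=
  let r := trunc_body sections seg.1
  acc ++ r.1 ++ (if r.2 then [] else seg.2)

def merge_with_existing_alt (existing_text : String) (new_text : String) (strategy : String) : String :=
  if strategy == "replace" || PySem.Str.strip existing_text == "" then new_text
  else
    let existing_lines :=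
      (PySem.Str.split? (PySem.Str.replace (PySem.Str.replace existing_text "\r\n" "\n") "\r" "\n") "\n").getD []
    let new_lines :=
      (PySem.Str.split? (PySem.Str.replace (PySem.Str.replace new_text "\r\n" "\n") "\r" "\n") "\n").getD []
    let sections := (segments existing_lines).foldl sec_step (PySem.Set.ofList [])
    let kept := (segments new_lines).foldl (filt_step sections) []
    let lines := existing_lines ++ kept
    -- zip each line with its predecessor ("." sentinel for the first); keep a blank
    -- line only when its predecessor is not blank
    let merged := ((("." :: lines).zip lines).filter
      (fun pl => PySem.Str.strip pl.2 != "" || PySem.Str.strip pl.1 != "")).map Prod.snd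
    let text := PySem.Str.join "\n" merged
    if text != "" && !(PySem.Str.endswith text "\n") then text ++ "\n" else text

-- ===== PRECONDITION & SPEC =====
def Spec_merge_with_existing (existing_text : String) (new_text : String) (strategy : String) (out : String) : Prop := out = merge_with_existing_alt existing_text new_text strategy
instance (existing_text : String) (new_text : String) (strategy : String) (out : String) : Decidable (Spec_merge_with_existing existing_text new_text strategy out) := by unfold Spec_merge_with_existing; infer_instance

-- ===== CLAIM (what is proved, stated in full; the proofs are below) =====
def Claim_equal_merge_with_existing : Prop := ∀ (existing_text : String) (new_text : String) (strategy : String), Dom_merge_with_existing existing_text new_text strategy → Spec_merge_with_existing existing_text new_text strategy (merge_with_existing existing_text new_text strategy)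

-- ===== LEMMAS AND PROOFS =====

-- a line cannot start with both "###> " and "###< "
theorem not_both_prefix (line : String) (h : PySem.Str.startswith line "###> " = true) :
    PySem.Str.startswith line "###< " = false := by
  by_contra hc
  rw [Bool.not_eq_false, PySem.Str.startswith_eq, PySem.Chars.startswith_iff] at hc
  rw [PySem.Str.startswith_eq, PySem.Chars.startswith_iff] at h
  have h3 := h.getElem (i := 3) (by simp)
  have h3' := hc.getElem (i := 3) (by simp)
  rw [← h3'] at h3
  simp at h3

-- "resume after the close": tail of the remaining lines after the close-free prefix
def after_close (ls : List String) : List String :=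
  (ls.dropWhile (fun l => !(PySem.Str.startswith l "###< "))).tail

theorem after_close_length (ls : List String) : (after_close ls).length ≤ ls.length := by
  unfold after_close
  have h1 := List.length_dropWhile_le (fun l => !(PySem.Str.startswith l "###< ")) ls
  have h2 : ((ls.dropWhile (fun l => !(PySem.Str.startswith l "###< "))).tail).length
      = (ls.dropWhile (fun l => !(PySem.Str.startswith l "###< "))).length - 1 :=
    List.length_tail
  omega

-- recursive restatement of A's first while loop
def scanRec : List String → PySem.Set String → PySem.Set String
  | [], acc => acc
  | l :: ls, acc =>
    if PySem.Str.startswith l "###> " then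
      scanRec (after_close ls) (PySem.Set.add acc (PySem.Str.slice l (some 5) none))
    else scanRec ls acc
termination_by ls => ls.length
decreasing_by
  · exact Nat.lt_succ_of_le (after_close_length ls)
  · simp

theorem scanRec_nil (acc : PySem.Set String) : scanRec [] acc = acc := by rw [scanRec]

theorem scanRec_cons (l : String) (ls : List String) (acc : PySem.Set String) :
    scanRec (l :: ls) acc =
      if PySem.Str.startswith l "###> " then
        scanRec (after_close ls) (PySem.Set.add acc (PySem.Str.slice l (some 5) none))
      else scanRec ls acc := by rw [scanRec]

-- recursive restatement of A's second while loop
def filtRec (s : PySem.Set String) : List String → List String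
  | [] => []
  | l :: ls =>
    if PySem.Str.startswith l "###> " &&
        decide ((PySem.Str.slice l (some 5) none) ∈ s) then
      filtRec s (after_close ls)
    else l :: filtRec s ls
termination_by ls => ls.length
decreasing_by
  · exact Nat.lt_succ_of_le (after_close_length ls)
  · simp

theorem filtRec_nil (s : PySem.Set String) : filtRec s [] = [] := by rw [filtRec]

theorem filtRec_cons (s : PySem.Set String) (l : String) (ls : List String) :
    filtRec s (l :: ls) =
      if PySem.Str.startswith l "###> " &&
          decide ((PySem.Str.slice l (some 5) none) ∈ s) then
        filtRec s (after_close ls)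
      else l :: filtRec s ls := by rw [filtRec]

-- recursive characterization of B's `segments`
def segRec : List String → List (List String × List String)
  | [] => [([], [])]
  | l :: ls =>
    if PySem.Str.startswith l "###< " then ([], [l]) :: segRec ls
    else
      match segRec ls with
      | [] => [([l], [])]
      | (b, c) :: rest => (l :: b, c) :: rest

theorem segRec_cons (l : String) (ls : List String) :
    segRec (l :: ls) =
      if PySem.Str.startswith l "###< " then ([], [l]) :: segRec ls
      else
        match segRec ls with
        | [] => [([l], [])]
        | (b, c) :: rest => (l :: b, c) :: rest := by rw [segRec]

theorem segRec_ne_nil (ls : List String) : segRec ls ≠ [] := by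
  cases ls with
  | nil => simp [segRec]
  | cons l t =>
    rw [segRec_cons]
    split
    · simp
    · cases h : segRec t with
      | nil => simp
      | cons hd rest => cases hd; simp

-- skip_to_close in terms of dropWhile
theorem drop_skip_to_close (lines : List String) (i : Nat) :
    lines.drop (skip_to_close lines i)
      = (lines.drop i).dropWhile (fun l => !(PySem.Str.startswith l "###< ")) := by
  by_cases h : i < lines.length
  · conv_rhs => rw [List.drop_eq_getElem_cons h, List.dropWhile_cons]
    by_cases hc : PySem.Str.startswith lines[i] "###< " = true
    · have hs : skip_to_close lines i = i := by
        unfold skip_to_close; rw [dif_pos h, if_pos hc]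
      rw [hs, if_neg (by rw [hc]; simp)]
      exact List.drop_eq_getElem_cons h
    · have hs : skip_to_close lines i = skip_to_close lines (i + 1) := by
        conv_lhs => unfold skip_to_close
        rw [dif_pos h, if_neg hc]
      rw [hs, if_pos (by rw [Bool.not_eq_true] at hc; rw [hc]; simp)]
      exact drop_skip_to_close lines (i + 1)
  · have hs : skip_to_close lines i = i := by
      unfold skip_to_close; rw [dif_neg h]
    rw [hs, List.drop_eq_nil_of_le (by omega : lines.length ≤ i)]
    rfl
termination_by lines.length - i

theorem drop_skip_succ (lines : List String) (i : Nat) :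
    lines.drop (skip_to_close lines i + 1) = after_close (lines.drop i) := by
  rw [after_close, ← drop_skip_to_close, List.tail_drop]

-- A's first while loop equals its recursive restatement
theorem scan_sections_eq (lines : List String) (i : Nat) (acc : PySem.Set String) :
    scan_sections lines i acc = scanRec (lines.drop i) acc := by
  by_cases h : i < lines.length
  · rw [List.drop_eq_getElem_cons h, scanRec_cons]
    by_cases hg : PySem.Str.startswith lines[i] "###> " = true
    · rw [if_pos hg]
      conv_lhs => unfold scan_sections
      rw [dif_pos h, if_pos hg, scan_sections_eq lines (skip_to_close lines i + 1) _]
      have hss : skip_to_close lines i = skip_to_close lines (i + 1) := by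
        conv_lhs => unfold skip_to_close
        rw [dif_pos h, if_neg (by rw [not_both_prefix _ hg]; simp)]
      rw [hss, drop_skip_succ]
    · rw [if_neg hg]
      conv_lhs => unfold scan_sections
      rw [dif_pos h, if_neg hg]
      exact scan_sections_eq lines (i + 1) acc
  · conv_lhs => unfold scan_sections
    rw [dif_neg h, List.drop_eq_nil_of_le (by omega : lines.length ≤ i), scanRec_nil]
termination_by lines.length - i
decreasing_by
  · have := le_skip_to_close lines i; omega
  · omega

-- A's second while loop equals its recursive restatement
theorem filter_new_eq (lines : List String) (s : PySem.Set String) (i : Nat) (acc : List String) :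
    filter_new lines s i acc = acc ++ filtRec s (lines.drop i) := by
  by_cases h : i < lines.length
  · rw [List.drop_eq_getElem_cons h, filtRec_cons]
    by_cases hg : (PySem.Str.startswith lines[i] "###> " &&
        decide ((PySem.Str.slice lines[i] (some 5) none) ∈ s)) = true
    · have hsw : PySem.Str.startswith lines[i] "###> " = true := by
        simpa using (Bool.and_elim_left hg)
      rw [if_pos hg]
      conv_lhs => unfold filter_new
      rw [dif_pos h, if_pos hg]
      have hj : lines.drop (if skip_to_close lines i < lines.length
            then skip_to_close lines i + 1 else skip_to_close lines i)
          = lines.drop (skip_to_close lines i + 1) := by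
        split
        · rfl
        · rw [List.drop_eq_nil_of_le (by omega), List.drop_eq_nil_of_le (by omega)]
      rw [filter_new_eq lines s _ acc, hj]
      have hss : skip_to_close lines i = skip_to_close lines (i + 1) := by
        conv_lhs => unfold skip_to_close
        rw [dif_pos h, if_neg (by rw [not_both_prefix _ hsw]; simp)]
      rw [hss, drop_skip_succ]
    · rw [if_neg hg]
      conv_lhs => unfold filter_new
      rw [dif_pos h, if_neg hg]
      rw [filter_new_eq lines s (i + 1) (acc ++ [lines[i]])]
      simp
  · conv_lhs => unfold filter_new
    rw [dif_neg h, List.drop_eq_nil_of_le (by omega : lines.length ≤ i), filtRec_nil]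
    simp
termination_by lines.length - i
decreasing_by
  · have := le_skip_to_close lines i; split <;> omega
  · omega

-- B's fold-built segments equal the recursive characterization
theorem segments_foldl (ls : List String) (segs : List (List String × List String))
    (cur : List String) :
    (let st := ls.foldl seg_step (segs, cur); st.1 ++ [(st.2, [])])
      = segs ++ (match segRec ls with
          | [] => []
          | (b, c) :: rest => (cur ++ b, c) :: rest) := by
  induction ls generalizing segs cur with
  | nil => simp [segRec]
  | cons l t ih =>
    by_cases hc : PySem.Str.startswith l "###< " = true
    · rw [show (l :: t).foldl seg_step (segs, cur)
          = t.foldl seg_step (segs ++ [(cur, [l])], []) from by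
        rw [List.foldl_cons]
        show t.foldl seg_step (seg_step (segs, cur) l) = _
        rw [show seg_step (segs, cur) l = (segs ++ [(cur, [l])], []) from by
          unfold seg_step; rw [if_pos hc]]]
      rw [segRec_cons, if_pos hc]
      have := ih (segs ++ [(cur, [l])]) []
      simp only at this ⊢
      rw [this]
      cases h : segRec t with
      | nil => exact absurd h (segRec_ne_nil t)
      | cons hd rest => cases hd; simp
    · rw [show (l :: t).foldl seg_step (segs, cur)
          = t.foldl seg_step (segs, cur ++ [l]) from by
        rw [List.foldl_cons]
        show t.foldl seg_step (seg_step (segs, cur) l) = _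
        rw [show seg_step (segs, cur) l = (segs, cur ++ [l]) from by
          unfold seg_step; rw [if_neg hc]]]
      have := ih segs (cur ++ [l])
      simp only at this ⊢
      rw [this, segRec_cons, if_neg hc]
      cases h : segRec t with
      | nil => exact absurd h (segRec_ne_nil t)
      | cons hd rest => cases hd; simp

theorem segments_eq (ls : List String) : segments ls = segRec ls := by
  have := segments_foldl ls [] []
  simp only [List.nil_append] at this
  rw [segments, this]
  cases h : segRec ls with
  | nil => exact absurd h (segRec_ne_nil ls)
  | cons hd rest => cases hd; simp

-- span-style decomposition of segRec at the first close line
theorem segRec_span (t : List String) :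
    (t.dropWhile (fun l => !(PySem.Str.startswith l "###< ")) = [] ∧ segRec t = [(t, [])]) ∨
    (∃ cl post, t.dropWhile (fun l => !(PySem.Str.startswith l "###< ")) = cl :: post ∧
      segRec t = (t.takeWhile (fun l => !(PySem.Str.startswith l "###< ")), [cl]) :: segRec post ∧
      post.length ≤ t.length) := by
  induction t with
  | nil => left; exact ⟨rfl, rfl⟩
  | cons l t ih =>
    by_cases hc : PySem.Str.startswith l "###< " = true
    · right
      refine ⟨l, t, ?_, ?_, by simp⟩
      · rw [List.dropWhile_cons, if_neg (by rw [hc]; simp)]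
      · rw [List.takeWhile_cons, if_neg (by rw [hc]; simp), segRec_cons, if_pos hc]
    · have hc' : (!PySem.Str.startswith l "###< ") = true := by
        rw [Bool.not_eq_true] at hc; rw [hc]; simp
      have hdrop : (l :: t).dropWhile (fun l => !(PySem.Str.startswith l "###< "))
          = t.dropWhile (fun l => !(PySem.Str.startswith l "###< ")) := by
        rw [List.dropWhile_cons, if_pos hc']
      have htake : (l :: t).takeWhile (fun l => !(PySem.Str.startswith l "###< "))
          = l :: t.takeWhile (fun l => !(PySem.Str.startswith l "###< ")) := by
        rw [List.takeWhile_cons, if_pos hc']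
      rcases ih with ⟨h1, h2⟩ | ⟨cl, post, h1, h2, h3⟩
      · left
        refine ⟨by rw [hdrop, h1], ?_⟩
        rw [segRec_cons, if_neg hc, h2]
      · right
        refine ⟨cl, post, by rw [hdrop, h1], ?_, by simpa using Nat.le_succ_of_le h3⟩
        rw [htake, segRec_cons, if_neg hc, h2]

-- scanRec equals B's sections fold over the segments
theorem scanRec_eq_segFold (ls : List String) (acc : PySem.Set String) :
    scanRec ls acc = (segRec ls).foldl sec_step acc := by
  cases ls with
  | nil => simp [scanRec_nil, segRec, sec_step, first_opener]
  | cons l t =>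
    rw [scanRec_cons]
    by_cases hg : PySem.Str.startswith l "###> " = true
    · have hc : PySem.Str.startswith l "###< " = false := not_both_prefix _ hg
      rw [if_pos hg, segRec_cons, if_neg (by rw [hc]; simp)]
      rcases segRec_span t with ⟨h1, h2⟩ | ⟨cl, post, h1, h2, h3⟩
      · rw [h2, after_close, h1]
        simp only [List.tail_nil, List.foldl_cons, List.foldl_nil, scanRec_nil]
        rw [show sec_step acc (l :: t, []) = PySem.Set.add acc (PySem.Str.slice l (some 5) none)
          from by simp only [sec_step, first_opener]; rw [if_pos hg]]
      · rw [h2, after_close, h1]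
        simp only [List.tail_cons, List.foldl_cons]
        rw [show sec_step acc (l :: t.takeWhile (fun l => !(PySem.Str.startswith l "###< ")), [cl])
            = PySem.Set.add acc (PySem.Str.slice l (some 5) none) from by
          simp only [sec_step, first_opener]; rw [if_pos hg]]
        exact scanRec_eq_segFold post _
    · rw [if_neg hg]
      by_cases hc : PySem.Str.startswith l "###< " = true
      · rw [segRec_cons, if_pos hc, List.foldl_cons,
          show sec_step acc ([], [l]) = acc from by simp only [sec_step, first_opener]]
        exact scanRec_eq_segFold t acc
      · rw [segRec_cons, if_neg hc]
        cases h : segRec t with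
        | nil => exact absurd h (segRec_ne_nil t)
        | cons hd rest =>
          cases hd with
          | mk b c =>
            simp only [List.foldl_cons]
            rw [show sec_step acc (l :: b, c) = sec_step acc (b, c) from by
              simp only [sec_step, first_opener]; rw [if_neg hg]]
            rw [← List.foldl_cons, ← h]
            exact scanRec_eq_segFold t acc
termination_by ls.length
decreasing_by
  · simpa using Nat.lt_succ_of_le h3
  · simp
  · simp

-- per-segment output of B's filter fold
def seg_out (s : PySem.Set String) (seg : List String × List String) : List String :=
  (trunc_body s seg.1).1 ++ (if (trunc_body s seg.1).2 then [] else seg.2)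

-- filtRec equals B's kept fold over the segments
theorem filtRec_eq_segFlat (s : PySem.Set String) (ls : List String) :
    filtRec s ls = (segRec ls).flatMap (seg_out s) := by
  cases ls with
  | nil => simp [filtRec_nil, segRec, seg_out, trunc_body]
  | cons l t =>
    rw [filtRec_cons]
    by_cases hg : (PySem.Str.startswith l "###> " &&
        decide ((PySem.Str.slice l (some 5) none) ∈ s)) = true
    · have hsw : PySem.Str.startswith l "###> " = true := by
        simpa using (Bool.and_elim_left hg)
      have hc : PySem.Str.startswith l "###< " = false := not_both_prefix _ hsw
      rw [if_pos hg, segRec_cons, if_neg (by rw [hc]; simp)]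
      rcases segRec_span t with ⟨h1, h2⟩ | ⟨cl, post, h1, h2, h3⟩
      · rw [h2, after_close, h1]
        simp only [List.tail_nil, List.flatMap_cons, List.flatMap_nil, filtRec_nil]
        rw [show seg_out s (l :: t, []) = [] from by
          simp only [seg_out, trunc_body]
          rw [if_pos hg]
          simp]
        simp
      · rw [h2, after_close, h1]
        simp only [List.tail_cons, List.flatMap_cons]
        rw [show seg_out s (l :: t.takeWhile (fun l => !(PySem.Str.startswith l "###< ")), [cl])
            = [] from by
          simp only [seg_out, trunc_body]
          rw [if_pos hg]
          simp]
        rw [List.nil_append]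
        exact filtRec_eq_segFlat s post
    · rw [if_neg hg]
      by_cases hc : PySem.Str.startswith l "###< " = true
      · rw [segRec_cons, if_pos hc, List.flatMap_cons,
          show seg_out s ([], [l]) = [l] from by simp [seg_out, trunc_body],
          List.singleton_append, filtRec_eq_segFlat s t]
      · rw [segRec_cons, if_neg hc]
        cases h : segRec t with
        | nil => exact absurd h (segRec_ne_nil t)
        | cons hd rest =>
          cases hd with
          | mk b c =>
            simp only [List.flatMap_cons]
            rw [show seg_out s (l :: b, c) = l :: seg_out s (b, c) from by
              simp only [seg_out, trunc_body]
              rw [if_neg hg]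
              simp]
            rw [filtRec_eq_segFlat s t, h]
            simp
termination_by ls.length
decreasing_by
  · simpa using Nat.lt_succ_of_le h3
  · simp
  · simp

-- B's kept fold as a flatMap
theorem kept_foldl (s : PySem.Set String) (segs : List (List String × List String))
    (acc : List String) :
    segs.foldl (filt_step s) acc = acc ++ segs.flatMap (seg_out s) := by
  induction segs generalizing acc with
  | nil => simp
  | cons seg rest ih =>
    rw [List.foldl_cons, ih, List.flatMap_cons]
    simp [filt_step, seg_out]

theorem kept_foldl0 (s : PySem.Set String) (segs : List (List String × List String)) :
    segs.foldl (filt_step s) [] = segs.flatMap (seg_out s) := by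
  rw [kept_foldl]; simp

theorem filter_new0 (lines : List String) (s : PySem.Set String) :
    filter_new lines s 0 [] = filtRec s lines := by
  rw [filter_new_eq]; simp

-- the blank-count loop matched by the predecessor-zip filter
theorem collapse_go_eq (ls : List String) (acc : List String) (bc : Int) (prev : String)
    (h0 : 0 ≤ bc) (h1 : bc = 0 ↔ is_blank_line prev = false) :
    collapse_go ls acc bc
      = acc ++ (((prev :: ls).zip ls).filter
          (fun pl => PySem.Str.strip pl.2 != "" || PySem.Str.strip pl.1 != "")).map Prod.snd := by
  induction ls generalizing acc bc prev with
  | nil => simp [collapse_go]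
  | cons l t ih =>
    rw [show (prev :: l :: t).zip (l :: t) = (prev, l) :: (l :: t).zip t from rfl,
      List.filter_cons]
    by_cases hb : is_blank_line l = true
    · have hbs : (PySem.Str.strip l != "") = false := by
        simpa [is_blank_line] using hb
      by_cases h2 : bc = 0
      · have hprev : is_blank_line prev = false := h1.mp h2
        have hps : (PySem.Str.strip prev != "") = true := by
          simpa [is_blank_line] using hprev
        subst h2
        rw [show collapse_go (l :: t) acc 0 = collapse_go t (acc ++ [l]) 1 from by
          simp [collapse_go, hb]]
        rw [ih (acc ++ [l]) 1 l (by omega)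
          ⟨fun h => absurd h (by norm_num), fun h => by rw [hb] at h; cases h⟩]
        simp [hbs, hps]
      · have hprev : is_blank_line prev = true := by
          cases hp : is_blank_line prev
          · exact absurd (h1.mpr hp) h2
          · rfl
        have hps : (PySem.Str.strip prev != "") = false := by
          simpa [is_blank_line] using hprev
        rw [show collapse_go (l :: t) acc bc = collapse_go t acc (bc + 1) from by
          simp [collapse_go, hb]; omega]
        rw [ih acc (bc + 1) l (by omega)
          ⟨fun h => absurd h (by omega), fun h => by rw [hb] at h; cases h⟩]
        simp [hbs, hps]
    · have hbs : (PySem.Str.strip l != "") = true := by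
        simpa [is_blank_line] using hb
      rw [show collapse_go (l :: t) acc bc = collapse_go t (acc ++ [l]) 0 from by
        simp [collapse_go, hb]]
      rw [ih (acc ++ [l]) 0 l (by omega)
        ⟨fun _ => by simpa using hb, fun _ => rfl⟩]
      simp [hbs]

theorem collapse_go_eq' (ls : List String) :
    collapse_go ls [] 0
      = ((("." :: ls).zip ls).filter
          (fun pl => PySem.Str.strip pl.2 != "" || PySem.Str.strip pl.1 != "")).map Prod.snd := by
  rw [collapse_go_eq ls [] 0 "." (by omega) ⟨fun _ => by decide, fun _ => rfl⟩,
    List.nil_append]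

-- ===== VERDICT (by name: the statement is the Claim_ definition above) =====
set_option maxHeartbeats 1000000 in
theorem merge_with_existing_spec : Claim_equal_merge_with_existing := by
  intro existing_text new_text strategy _
  unfold Spec_merge_with_existing merge_with_existing merge_with_existing_alt parse_lines
  cases h1 : (strategy == "replace") with
  | true => simp
  | false =>
    cases h2 : (PySem.Str.strip existing_text == "") with
    | true => simp
    | false =>
      simp only [Bool.or_self, Bool.false_eq_true, if_false]
      rw [scan_sections_eq, List.drop_zero, scanRec_eq_segFold, filter_new0,
        filtRec_eq_segFlat, ← segments_eq, ← segments_eq, ← kept_foldl0]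
      simp only [collapse_blank_lines]
      rw [collapse_go_eq']
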